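-- pv_equiv track=rewrite | github.com/YoujunZhao/AutoRebuttal | skills/super-rebuttal/scripts/build_reviewer_cards.py | _primary_concerns
-- ===== SOURCE A (Python) =====
-- def _primary_concerns(text: str) -> list[str]:
--     lowered = text.lower()
--     concerns: list[str] = []
--     mapping = [
--         ("novelty", "novelty"),
--         ("experiment", "empirical_support"),
--         ("evidence", "empirical_support"),
--         ("weak", "empirical_support"),
--         ("insufficient", "empirical_support"),
--         ("baseline", "baseline_comparison"),
--         ("ablation", "missing_ablation"),
--         ("clarify", "clarity"),
--         ("writing", "clarity"),
--         ("scope", "scope_mismatch"),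
--         ("limited", "scope_mismatch"),
--         ("reproduc", "reproducibility"),
--         ("theory", "theory"),
--         ("proof", "theory"),
--     ]
--     for needle, label in mapping:
--         if needle in lowered and label not in concerns:
--             concerns.append(label)
--     if not concerns:
--         concerns.append("general_concern")
--     return concerns
-- ===== SOURCE B (Python) =====
-- _NEEDLE_LABELS = [
--     ("novelty", "novelty"),
--     ("experiment", "empirical_support"),
--     ("evidence", "empirical_support"),
--     ("weak", "empirical_support"),
--     ("insufficient", "empirical_support"),
--     ("baseline", "baseline_comparison"),
--     ("ablation", "missing_ablation"),
--     ("clarify", "clarity"),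
--     ("writing", "clarity"),
--     ("scope", "scope_mismatch"),
--     ("limited", "scope_mismatch"),
--     ("reproduc", "reproducibility"),
--     ("theory", "theory"),
--     ("proof", "theory"),
-- ]
--
-- _LABEL_ORDER = [
--     "novelty", "empirical_support", "baseline_comparison", "missing_ablation",
--     "clarity", "scope_mismatch", "reproducibility", "theory",
-- ]
--
--
-- def _primary_concerns(text: str) -> list[str]:
--     # Single sweep over the text positions: at each position record every
--     # keyword that starts there (a multi-pattern match), then emit the hit
--     # labels in the canonical label order.
--     lowered = text.lower()
--     hit = set()
--     for i in range(len(lowered)):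
--         for needle, label in _NEEDLE_LABELS:
--             if lowered.startswith(needle, i):
--                 hit.add(label)
--     concerns = [label for label in _LABEL_ORDER if label in hit]
--     return concerns if concerns else ["general_concern"]
-- ===== Notes on version B (the rewrite author's own statement) =====
-- stated objective: alternative
-- what changed: Instead of testing each needle with a substring containment operator and deduplicating labels while appending, B does one sweep over the text positions doing a multi-pattern startswith match into a set of hit labels, then emits the hit labels by filtering the canonical label order; return order comes from the label table, not from accumulation.
import Mathlib
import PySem

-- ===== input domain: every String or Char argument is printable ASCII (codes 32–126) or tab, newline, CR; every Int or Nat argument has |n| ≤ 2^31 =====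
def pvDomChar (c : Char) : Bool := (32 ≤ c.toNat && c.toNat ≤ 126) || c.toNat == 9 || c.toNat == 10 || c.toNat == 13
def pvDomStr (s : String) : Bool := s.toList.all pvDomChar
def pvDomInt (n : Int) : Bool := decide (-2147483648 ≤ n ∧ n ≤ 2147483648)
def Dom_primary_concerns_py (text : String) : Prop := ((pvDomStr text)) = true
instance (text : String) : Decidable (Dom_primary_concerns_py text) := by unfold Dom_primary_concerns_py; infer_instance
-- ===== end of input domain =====

-- B replaces per-needle 'in' tests with one sweep over text positions doing a
-- multi-pattern startswith match into a set, then filters the canonical label order.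


-- ===== PORT A =====
-- one step of A's loop: append the label if the needle occurs and the label is not yet listed
def pvStepA (lowered : String) (concerns : List String) (nl : String × String) : List String :=
  if PySem.Str.isIn nl.1 lowered && !(concerns.contains nl.2) then concerns ++ [nl.2] else concerns

def primary_concerns_py (text : String) : List String :=
  let lowered := PySem.Str.lower text
  let mapping : List (String × String) :=
    [("novelty", "novelty"),
     ("experiment", "empirical_support"),
     ("evidence", "empirical_support"),
     ("weak", "empirical_support"),
     ("insufficient", "empirical_support"),
     ("baseline", "baseline_comparison"),
     ("ablation", "missing_ablation"),
     ("clarify", "clarity"),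
     ("writing", "clarity"),
     ("scope", "scope_mismatch"),
     ("limited", "scope_mismatch"),
     ("reproduc", "reproducibility"),
     ("theory", "theory"),
     ("proof", "theory")]
  let concerns := mapping.foldl (pvStepA lowered) []
  if concerns.isEmpty then concerns ++ ["general_concern"] else concerns

-- ===== PORT B =====
-- B's needle → label table and canonical label order (module-level constants in Source B)
def pvNeedleLabels : List (String × String) :=
  [("novelty", "novelty"),
   ("experiment", "empirical_support"),
   ("evidence", "empirical_support"),
   ("weak", "empirical_support"),
   ("insufficient", "empirical_support"),
   ("baseline", "baseline_comparison"),
   ("ablation", "missing_ablation"),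
   ("clarify", "clarity"),
   ("writing", "clarity"),
   ("scope", "scope_mismatch"),
   ("limited", "scope_mismatch"),
   ("reproduc", "reproducibility"),
   ("theory", "theory"),
   ("proof", "theory")]

def pvLabelOrder : List String :=
  ["novelty", "empirical_support", "baseline_comparison", "missing_ablation",
   "clarity", "scope_mismatch", "reproducibility", "theory"]

-- lowered.startswith(needle, i) on a nonnegative in-range offset i
def pvHitsAt (low : List Char) (i : Nat) (h : PySem.Set String) (nl : String × String) : PySem.Set String :=
  if PySem.Chars.startswith (low.drop i) nl.1.toList then PySem.Set.add h nl.2 else h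

def primary_concerns_py_alt (text : String) : List String :=
  let low := (PySem.Str.lower text).toList
  let hit : PySem.Set String :=
    (List.range low.length).foldl (fun h i => pvNeedleLabels.foldl (pvHitsAt low i) h) PySem.Set.empty
  let concerns := pvLabelOrder.filter (fun l => PySem.Set.contains hit l)
  if concerns.isEmpty then ["general_concern"] else concerns

-- ===== PRECONDITION & SPEC =====
def Spec_primary_concerns_py (text : String) (out : List String) : Prop := out = primary_concerns_py_alt text
instance (text : String) (out : List String) : Decidable (Spec_primary_concerns_py text out) := by unfold Spec_primary_concerns_py; infer_instance

-- ===== CLAIM (what is proved, stated in full; the proofs are below) =====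
def Claim_equal_primary_concerns_py : Prop := ∀ (text : String), Dom_primary_concerns_py text → Spec_primary_concerns_py text (primary_concerns_py text)

-- ===== LEMMAS AND PROOFS =====

-- A's mapping grouped by label (proof-only view of A's flat list)
def pvGroups : List (String × List String) :=
  [("novelty", ["novelty"]),
   ("empirical_support", ["experiment", "evidence", "weak", "insufficient"]),
   ("baseline_comparison", ["baseline"]),
   ("missing_ablation", ["ablation"]),
   ("clarity", ["clarify", "writing"]),
   ("scope_mismatch", ["scope", "limited"]),
   ("reproducibility", ["reproduc"]),
   ("theory", ["theory", "proof"])]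

-- once a label is already listed, A's loop over that label's needles does nothing
theorem pvStay (low l : String) (ns : List String) : ∀ (acc : List String), l ∈ acc →
    (ns.map (fun n => (n, l))).foldl (pvStepA low) acc = acc := by
  induction ns with
  | nil => intro acc _; rfl
  | cons n ns ih =>
    intro acc h
    have hc : acc.contains l = true := by simpa using h
    simp only [List.map_cons, List.foldl_cons, pvStepA, hc, Bool.not_true, Bool.and_false]
    exact ih acc h

-- A's loop over one label's needles appends the label iff some needle matches
theorem pvGroup (low l : String) (ns : List String) : ∀ (acc : List String), l ∉ acc →
    (ns.map (fun n => (n, l))).foldl (pvStepA low) acc =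
      if ns.any (fun n => PySem.Str.isIn n low) then acc ++ [l] else acc := by
  induction ns with
  | nil => intro acc _; rfl
  | cons n ns ih =>
    intro acc h
    have hc : acc.contains l = false := by simpa using h
    by_cases hn : PySem.Str.isIn n low = true
    · simp only [List.map_cons, List.foldl_cons, pvStepA, hn, hc, Bool.not_false, Bool.and_true,
        if_true, List.any_cons, Bool.true_or]
      exact pvStay low l ns (acc ++ [l]) (by simp)
    · have hn' : PySem.Str.isIn n low = false := by simpa using hn
      simp only [List.map_cons, List.foldl_cons, pvStepA, hn', Bool.false_and,
        List.any_cons, Bool.false_or]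
      exact ih acc h

-- A's whole loop over the flattened grouped mapping = filter over groups
theorem pvMain (low : String) (gs : List (String × List String)) : ∀ (acc : List String),
    (∀ g ∈ gs, g.1 ∉ acc) → (gs.map Prod.fst).Nodup →
    (gs.flatMap (fun g => g.2.map (fun n => (n, g.1)))).foldl (pvStepA low) acc =
      acc ++ (gs.filter (fun g => g.2.any (fun n => PySem.Str.isIn n low))).map Prod.fst := by
  induction gs with
  | nil => intro acc _ _; simp
  | cons g gs ih =>
    intro acc hfresh hnd
    have hnd2 : (g.1 :: gs.map Prod.fst).Nodup := by simpa using hnd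
    have hg : g.1 ∉ gs.map Prod.fst := (List.nodup_cons.mp hnd2).1
    have hnd' : (gs.map Prod.fst).Nodup := (List.nodup_cons.mp hnd2).2
    rw [List.flatMap_cons, List.foldl_append,
      pvGroup low g.1 g.2 acc (hfresh g (by simp))]
    by_cases hm : (g.2.any (fun n => PySem.Str.isIn n low)) = true
    · rw [if_pos hm, ih (acc ++ [g.1])
        (by
          intro g' hg' hmem
          rcases List.mem_append.mp hmem with h1 | h1
          · exact hfresh g' (by simp [hg']) h1
          · have he : g'.1 = g.1 := by simpa using h1
            have hmm : g'.1 ∈ gs.map Prod.fst := List.mem_map_of_mem hg'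
            rw [he] at hmm
            exact hg hmm) hnd',
        List.filter_cons_of_pos (l := gs) (by exact hm), List.map_cons]
      simp
    · rw [if_neg hm,
        ih acc (fun g' hg' => hfresh g' (by simp [hg'])) hnd',
        List.filter_cons_of_neg (l := gs) (by exact hm)]

-- B's inner loop: the set after scanning all needles at position i
theorem pvInner (low : List Char) (i : Nat) (l : String) (nls : List (String × String)) :
    ∀ (h : PySem.Set String), l ∈ nls.foldl (pvHitsAt low i) h ↔
      l ∈ h ∨ ∃ nl ∈ nls, nl.2 = l ∧ PySem.Chars.startswith (low.drop i) nl.1.toList = true := by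
  induction nls with
  | nil => intro h; simp
  | cons nl nls ih =>
    intro h
    simp only [List.foldl_cons, ih, List.mem_cons]
    by_cases hs : PySem.Chars.startswith (low.drop i) nl.1.toList = true
    · simp only [pvHitsAt, hs, if_true, PySem.Set.mem_add]
      constructor
      · rintro (⟨hm | he⟩ | ⟨nl', hm, he, hsw⟩)
        · exact Or.inl hm
        · exact Or.inr ⟨nl, Or.inl rfl, he.symm, hs⟩
        · exact Or.inr ⟨nl', Or.inr hm, he, hsw⟩
      · rintro (hm | ⟨nl', (rfl | hm), he, hsw⟩)
        · exact Or.inl (Or.inl hm)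
        · exact Or.inl (Or.inr he.symm)
        · exact Or.inr ⟨nl', hm, he, hsw⟩
    · have hs' : PySem.Chars.startswith (low.drop i) nl.1.toList = false := by simpa using hs
      simp only [pvHitsAt, hs', Bool.false_eq_true, if_false]
      constructor
      · rintro (hm | ⟨nl', hm, he, hsw⟩)
        · exact Or.inl hm
        · exact Or.inr ⟨nl', Or.inr hm, he, hsw⟩
      · rintro (hm | ⟨nl', (rfl | hm), he, hsw⟩)
        · exact Or.inl hm
        · exact absurd hsw (by simp [hs'])
        · exact Or.inr ⟨nl', hm, he, hsw⟩

-- B's outer loop: the set after sweeping the positions in idxs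
theorem pvOuter (low : List Char) (l : String) (idxs : List Nat) :
    ∀ (h : PySem.Set String),
      l ∈ idxs.foldl (fun h i => pvNeedleLabels.foldl (pvHitsAt low i) h) h ↔
      l ∈ h ∨ ∃ i ∈ idxs, ∃ nl ∈ pvNeedleLabels, nl.2 = l ∧
        PySem.Chars.startswith (low.drop i) nl.1.toList = true := by
  induction idxs with
  | nil => intro h; simp
  | cons i idxs ih =>
    intro h
    simp only [List.foldl_cons, ih, pvInner, List.mem_cons]
    constructor
    · rintro (⟨hm | ⟨nl, hnl, he, hsw⟩⟩ | ⟨i', hm, rest⟩)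
      · exact Or.inl hm
      · exact Or.inr ⟨i, Or.inl rfl, nl, hnl, he, hsw⟩
      · exact Or.inr ⟨i', Or.inr hm, rest⟩
    · rintro (hm | ⟨i', (rfl | hm), rest⟩)
      · exact Or.inl (Or.inl hm)
      · exact Or.inl (Or.inr rest)
      · exact Or.inr ⟨i', hm, rest⟩

-- membership in B's hit set ↔ some needle with that label occurs in the lowered text
theorem pvHitMem (lowered : String) (l : String) :
    (l ∈ (List.range lowered.toList.length).foldl
        (fun h i => pvNeedleLabels.foldl (pvHitsAt lowered.toList i) h) PySem.Set.empty) ↔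
    ∃ nl ∈ pvNeedleLabels, nl.2 = l ∧ PySem.Str.isIn nl.1 lowered = true := by
  rw [pvOuter]
  simp only [PySem.Set.empty, List.not_mem_nil, false_or, List.mem_range]
  constructor
  · rintro ⟨i, _, nl, hnl, he, hsw⟩
    refine ⟨nl, hnl, he, ?_⟩
    have hpre : nl.1.toList <+: lowered.toList.drop i := (PySem.Chars.startswith_iff _ _).mp hsw
    have : PySem.Chars.isIn nl.1.toList lowered.toList = true :=
      (PySem.Chars.exists_prefix_drop_iff_isIn _ _).mp ⟨i, hpre⟩
    simpa using this
  · rintro ⟨nl, hnl, he, hin⟩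
    have hin' : PySem.Chars.isIn nl.1.toList lowered.toList = true := by simpa using hin
    obtain ⟨j, hpre⟩ := (PySem.Chars.exists_prefix_drop_iff_isIn _ _).mpr hin'
    have hne : nl.1.toList ≠ [] := by
      have hall : ∀ p, p ∈ pvNeedleLabels → p.1.toList ≠ [] := by decide
      exact hall nl hnl
    have hj : j < lowered.toList.length := by
      by_contra hge
      have : lowered.toList.drop j = [] := List.drop_eq_nil_of_le (by omega)
      rw [this] at hpre
      exact hne (List.prefix_nil.mp hpre)
    exact ⟨j, hj, nl, hnl, he, (PySem.Chars.startswith_iff _ _).mpr hpre⟩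

-- a group's any-needle test ↔ existence of a matching (needle,label) row with that label
theorem pvGroupAny (lowered : String) (g : String × List String) (hg : g ∈ pvGroups) :
    (g.2.any (fun n => PySem.Str.isIn n lowered)) = true ↔
    ∃ nl ∈ pvNeedleLabels, nl.2 = g.1 ∧ PySem.Str.isIn nl.1 lowered = true := by
  have hflat : pvNeedleLabels = pvGroups.flatMap (fun g => g.2.map (fun n => (n, g.1))) := by decide
  rw [hflat]
  simp only [List.any_eq_true, List.mem_flatMap, List.mem_map]
  constructor
  · rintro ⟨n, hn, hin⟩
    exact ⟨(n, g.1), ⟨g, hg, n, hn, rfl⟩, rfl, hin⟩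
  · rintro ⟨nl, ⟨g', hg', n, hn, rfl⟩, he, hin⟩
    have hnd : (pvGroups.map Prod.fst).Nodup := by decide
    have : g' = g := List.inj_on_of_nodup_map hnd hg' hg he
    subst this
    exact ⟨n, hn, hin⟩

-- ===== VERDICT (by name: the statement is the Claim_ definition above) =====
theorem primary_concerns_py_spec : Claim_equal_primary_concerns_py := by
  intro text _
  show primary_concerns_py text = primary_concerns_py_alt text
  simp only [primary_concerns_py, primary_concerns_py_alt]
  have key := pvMain (PySem.Str.lower text) pvGroups [] (by simp) (by decide)
  rw [show (pvGroups.flatMap (fun g => g.2.map (fun n => (n, g.1)))) =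
      ([("novelty", "novelty"), ("experiment", "empirical_support"),
        ("evidence", "empirical_support"), ("weak", "empirical_support"),
        ("insufficient", "empirical_support"), ("baseline", "baseline_comparison"),
        ("ablation", "missing_ablation"), ("clarify", "clarity"),
        ("writing", "clarity"), ("scope", "scope_mismatch"),
        ("limited", "scope_mismatch"), ("reproduc", "reproducibility"),
        ("theory", "theory"), ("proof", "theory")] : List (String × String)) from by decide]
    at key
  rw [List.nil_append] at key
  rw [key]
  have hord : pvLabelOrder = pvGroups.map Prod.fst := by decide
  rw [hord, List.filter_map]
  have hfc : ∀ g ∈ pvGroups,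
      ((fun l => PySem.Set.contains
          ((List.range (PySem.Str.lower text).toList.length).foldl
            (fun h i => pvNeedleLabels.foldl (pvHitsAt (PySem.Str.lower text).toList i) h)
            PySem.Set.empty) l) ∘ Prod.fst) g
        = g.2.any (fun n => PySem.Str.isIn n (PySem.Str.lower text)) := by
    intro g hg
    simp only [Function.comp]
    by_cases hmem : ∃ nl ∈ pvNeedleLabels, nl.2 = g.1 ∧
        PySem.Str.isIn nl.1 (PySem.Str.lower text) = true
    · rw [(pvGroupAny _ g hg).mpr hmem]
      exact (PySem.Set.contains_iff _ _).mpr ((pvHitMem _ _).mpr hmem)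
    · have h1 : (g.2.any (fun n => PySem.Str.isIn n (PySem.Str.lower text))) = false := by
        by_contra hc
        exact hmem ((pvGroupAny _ g hg).mp (by simpa using hc))
      rw [h1]
      by_contra hc
      exact hmem ((pvHitMem (PySem.Str.lower text) g.1).mp
        ((PySem.Set.contains_iff _ _).mp (by simpa using hc)))
  rw [List.filter_congr hfc]
  generalize ((pvGroups.filter
      (fun g => g.2.any (fun n => PySem.Str.isIn n (PySem.Str.lower text)))).map Prod.fst) = L
  cases L with
  | nil => rfl
  | cons x xs => rfl
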